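-- pv_equiv track=rewrite | github.com/cgubbin/doc_extractor | src/patent_ingest/common/span_utils.py | strip_leading_label_with_idx
-- ===== SOURCE A (Python) =====
-- def strip_leading_label_with_idx(s: str, labels: list[str]) -> tuple[str, int]:
--     """Strip a leading label from text and return the start index.
--
--     Case-insensitive label matching. Strips the label and any following
--     whitespace or colons.
--
--     Args:
--         s: Input string with potential leading label
--         labels: List of possible label strings to strip
--
--     Returns:
--         Tuple of (new_string_without_label, start_index_in_original)
--     """
--     if not s:
--         return s, 0
--
--     lead_ws = len(s) - len(s.lstrip())
--     ss = s.lstrip()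
--
--     for lab in labels:
--         if ss.lower().startswith(lab.lower()):
--             cut = ss[len(lab) :]
--             cut2 = cut.lstrip(" :\t\r\n")
--             start_idx = lead_ws + len(lab) + (len(cut) - len(cut2))
--             return cut2, start_idx
--
--     return s, 0
-- ===== SOURCE B (Python) =====
-- def strip_leading_label_with_idx(s: str, labels: list[str]) -> tuple[str, int]:
--     """Hash-index variant: build a dict from lowercase label -> first position
--     once, then probe prefixes of the string by length (one dict lookup per
--     candidate length) instead of scanning the label list for a prefix match."""
--     if not s:
--         return s, 0
--     lead = len(s) - len(s.lstrip())
--     low = s.lower()[lead:]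
--     index = {}
--     for pos, lab in enumerate(labels):
--         key = lab.lower()
--         if key not in index:
--             index[key] = pos
--     best = None
--     maxlen = max(map(len, index), default=0)
--     for d in range(min(len(low), maxlen) + 1):
--         pos = index.get(low[:d])
--         if pos is not None and (best is None or pos < best):
--             best = pos
--     if best is None:
--         return s, 0
--     lab = labels[best]
--     cut2 = s[lead + len(lab):].lstrip(" :\t\r\n")
--     return cut2, len(s) - len(cut2)
-- ===== Notes on version B (the rewrite author's own statement) =====
-- stated objective: alternative
-- what changed: B replaces A's per-label startswith scan with a hash index: it builds a dict from lowercase label to its first position once, then probes prefixes of the whitespace-stripped string by length (one dict lookup per candidate length) and takes the minimum position, so the label list is never scanned for a prefix match.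
import Mathlib
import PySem

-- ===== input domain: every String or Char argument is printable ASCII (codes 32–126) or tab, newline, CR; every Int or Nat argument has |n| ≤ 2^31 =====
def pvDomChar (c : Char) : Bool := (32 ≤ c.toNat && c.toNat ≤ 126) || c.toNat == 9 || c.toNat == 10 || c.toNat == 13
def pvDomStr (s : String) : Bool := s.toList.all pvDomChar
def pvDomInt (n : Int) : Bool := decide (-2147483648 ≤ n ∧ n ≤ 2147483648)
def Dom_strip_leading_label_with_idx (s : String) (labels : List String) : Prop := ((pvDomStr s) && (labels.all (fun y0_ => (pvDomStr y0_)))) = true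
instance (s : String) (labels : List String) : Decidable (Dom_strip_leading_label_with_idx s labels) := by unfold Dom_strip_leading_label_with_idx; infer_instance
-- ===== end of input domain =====

-- B builds a hash index from lowercase label to first position once and probes string prefixes
-- by length, instead of A's per-label startswith scan; objective: alternative.

-- ===== PORT A =====
-- the char set of A's cut.lstrip(" :\t\r\n")
def pvStripSet : List Char := [' ', ':', '\t', '\r', '\n']

-- A's match branch: cut = ss[len(lab):]; cut2 = cut.lstrip(" :\t\r\n") ported by hand as
-- dropWhile over the explicit char set (exact); start_idx as in A
def pvF (ss : String) (lead_ws : Int) (lab : String) : String × Int :=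
  let cut := PySem.Str.slice ss (some (PySem.Str.len lab)) none
  let cut2 := String.ofList (cut.toList.dropWhile (fun c => pvStripSet.contains c))
  (cut2, lead_ws + PySem.Str.len lab + (PySem.Str.len cut - PySem.Str.len cut2))

-- the 'for lab in labels' loop of A
def pvALoop (s ss : String) (lead_ws : Int) : List String → String × Int
  | [] => (s, 0)
  | lab :: rest =>
    if PySem.Str.startswith (PySem.Str.lower ss) (PySem.Str.lower lab) then pvF ss lead_ws lab
    else pvALoop s ss lead_ws rest

def strip_leading_label_with_idx (s : String) (labels : List String) : String × Int :=
  if s == "" then (s, 0)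
  else
    let lead_ws : Int := PySem.Str.len s - PySem.Str.len (PySem.Str.lstrip s)
    let ss := PySem.Str.lstrip s
    pvALoop s ss lead_ws labels

-- ===== PORT B =====
-- Source B's index-building loop body: 'key = lab.lower(); if key not in index: index[key] = pos'
def pvIndexStep (d : PySem.Dict String Int) (q : Int × String) : PySem.Dict String Int :=
  if d.contains (PySem.Str.lower q.2) then d else d.insert (PySem.Str.lower q.2) q.1

-- Source B's probe-loop body: 'pos = index.get(low[:d]); if pos is not None and (best is None or pos < best): best = pos'
def pvBestStep (index : PySem.Dict String Int) (low : String) (best : Option Int) (d : Int) : Option Int :=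
  match index.get? (PySem.Str.slice low none (some d)) with
  | some pos =>
    match best with
    | none => some pos
    | some q => if pos < q then some pos else best
  | none => best

def strip_leading_label_with_idx_alt (s : String) (labels : List String) : String × Int :=
  if s == "" then (s, 0)
  else
    let lead : Int := PySem.Str.len s - PySem.Str.len (PySem.Str.lstrip s)
    let low : String := PySem.Str.slice (PySem.Str.lower s) (some lead) none
    let index := (PySem.List.enumerate labels).foldl pvIndexStep PySem.Dict.empty
    let maxlen : Int := PySem.List.maxD (index.keys.map PySem.Str.len) (fun x => x) 0
    let best := (PySem.List.pyRange 0 (min (PySem.Str.len low) maxlen + 1) 1).foldl (pvBestStep index low) none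
    match best with
    | none => (s, 0)
    | some bi =>
      match PySem.List.pyGet? labels bi with
      | none => (s, 0)   -- unreachable: best is a position produced by enumerate(labels)
      | some lab =>
        -- Source B: cut2 = s[lead+len(lab):].lstrip(" :\t\r\n") (hand port of lstrip with char set, exact)
        let cut2 := String.ofList ((PySem.Str.slice s (some (lead + PySem.Str.len lab)) none).toList.dropWhile (fun c => pvStripSet.contains c))
        (cut2, PySem.Str.len s - PySem.Str.len cut2)

-- ===== PRECONDITION & SPEC =====
def Spec_strip_leading_label_with_idx (s : String) (labels : List String) (out : String × Int) : Prop := out = strip_leading_label_with_idx_alt s labels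
instance (s : String) (labels : List String) (out : String × Int) : Decidable (Spec_strip_leading_label_with_idx s labels out) := by unfold Spec_strip_leading_label_with_idx; infer_instance

-- ===== CLAIM (what is proved, stated in full; the proofs are below) =====
def Claim_equal_strip_leading_label_with_idx : Prop := ∀ (s : String) (labels : List String), Dom_strip_leading_label_with_idx s labels → Spec_strip_leading_label_with_idx s labels (strip_leading_label_with_idx s labels)

-- ===== LEMMAS AND PROOFS =====

-- A's loop returns pvF at the first index whose lowercased label is a prefix of lowercased ss
theorem aloop_eq_findIdx (s ss : String) (lead : Int) (labels : List String) :
    pvALoop s ss lead labels =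
      match labels.findIdx? (fun lab => PySem.Str.startswith (PySem.Str.lower ss) (PySem.Str.lower lab)) with
      | none => (s, 0)
      | some j => pvF ss lead (labels.getD j "") := by
  induction labels with
  | nil => rfl
  | cons lab rest ih =>
    rw [pvALoop, List.findIdx?_cons]
    cases h : PySem.Str.startswith (PySem.Str.lower ss) (PySem.Str.lower lab) with
    | true =>
      simp only [PySem.Str.startswith_eq] at h
      simp
    | false =>
      simp only [PySem.Str.startswith_eq] at h
      simp only [PySem.Str.startswith_eq, h, Bool.false_eq_true]
      rw [ih]
      cases hf : rest.findIdx? (fun l => PySem.Chars.startswith (PySem.Chars.lower ss.toList) (PySem.Chars.lower l.toList)) with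
      | none => simp [hf]
      | some j => simp [hf]

-- the dict of Source B's first loop: get? k is the first position whose lowercased label equals k
theorem index_get? (labels : List String) (s0 : Int) (d : PySem.Dict String Int) (k : String) :
    ((PySem.List.enumerate labels s0).foldl pvIndexStep d).get? k =
      match d.get? k with
      | some v => some v
      | none => (labels.findIdx? (fun lab => PySem.Str.lower lab == k)).map (fun i => s0 + (i : Int)) := by
  induction labels generalizing s0 d with
  | nil => cases hd : d.get? k <;> simp [PySem.List.enumerate_nil, hd]
  | cons lab rest ih =>
    rw [PySem.List.enumerate_cons, List.foldl_cons, List.findIdx?_cons]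
    by_cases h : (PySem.Str.lower lab == k) = true
    · have hk : PySem.Str.lower lab = k := by exact beq_iff_eq.mp h
      simp only [h]
      cases hd : d.get? k with
      | some v =>
        have hc : d.contains (PySem.Str.lower lab) = true := by
          rw [hk, PySem.Dict.contains_eq_isSome_get?, hd]; rfl
        simp only [pvIndexStep, hc, if_true, ih, hd]
      | none =>
        have hc : d.contains (PySem.Str.lower lab) = false := by
          rw [hk, PySem.Dict.contains_eq_isSome_get?, hd]; rfl
        simp only [pvIndexStep, hc, Bool.false_eq_true, if_false, ih]
        rw [hk, PySem.Dict.get?_insert]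
        simp
    · rw [Bool.not_eq_true] at h
      have hne : PySem.Str.lower lab ≠ k := by
        intro he; rw [he] at h; simp at h
      simp only [h]
      have hstep : (pvIndexStep d (s0, lab)).get? k = d.get? k := by
        simp only [pvIndexStep]
        split
        · rfl
        · rw [PySem.Dict.get?_insert, if_neg (fun he => hne he.symm)]
      rw [ih, hstep]
      cases d.get? k with
      | some v => rfl
      | none =>
        cases rest.findIdx? (fun l => PySem.Str.lower l == k) with
        | none => rfl
        | some j => simp; ring

-- the probe loop when no prefix is in the index
theorem best_none (index : PySem.Dict String Int) (low : String) (ds : List Int) (b0 : Option Int)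
    (h : ∀ d ∈ ds, index.get? (PySem.Str.slice low none (some d)) = none) :
    ds.foldl (pvBestStep index low) b0 = b0 := by
  induction ds generalizing b0 with
  | nil => rfl
  | cons d rest ih =>
    rw [List.foldl_cons]
    have hb : pvBestStep index low b0 d = b0 := by
      rw [pvBestStep, h d (by simp)]
    rw [hb]
    exact ih b0 (fun x hx => h x (by simp [hx]))

-- the probe loop computes the minimum position among all hits
theorem best_min (index : PySem.Dict String Int) (low : String) (ds : List Int) (jv : Int)
    (hlb : ∀ d ∈ ds, ∀ i, index.get? (PySem.Str.slice low none (some d)) = some i → jv ≤ i) :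
    ∀ b0, (b0 = none ∨ ∃ v, b0 = some v ∧ jv ≤ v) →
      ((∃ d ∈ ds, index.get? (PySem.Str.slice low none (some d)) = some jv) ∨ b0 = some jv) →
      ds.foldl (pvBestStep index low) b0 = some jv := by
  induction ds with
  | nil =>
    intro b0 _ hw
    rcases hw with ⟨d, hd, _⟩ | hb
    · exact absurd hd (by simp)
    · simpa using hb
  | cons d rest ih =>
    intro b0 hb hw
    rw [List.foldl_cons]
    have hlb' : ∀ x ∈ rest, ∀ i, index.get? (PySem.Str.slice low none (some x)) = some i → jv ≤ i :=
      fun x hx => hlb x (by simp [hx])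
    set b1 := pvBestStep index low b0 d with hb1
    have hb1inv : b1 = none ∨ ∃ v, b1 = some v ∧ jv ≤ v := by
      rw [hb1, pvBestStep]
      cases hg : index.get? (PySem.Str.slice low none (some d)) with
      | none => exact hb
      | some i =>
        have hji : jv ≤ i := hlb d (by simp) i hg
        rcases hb with hb | ⟨v, hv, hjv⟩
        · rw [hb]; exact Or.inr ⟨i, rfl, hji⟩
        · rw [hv]
          by_cases hlt : i < v
          · exact Or.inr ⟨i, by simp [hlt], hji⟩
          · exact Or.inr ⟨v, by simp [hlt], hjv⟩
    rcases hw with ⟨x, hx, hxe⟩ | hbjv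
    · rcases List.mem_cons.mp hx with hxd | hxr
      · subst hxd
        have hb1jv : b1 = some jv := by
          rw [hb1, pvBestStep, hxe]
          rcases hb with hb | ⟨v, hv, hjv⟩
          · rw [hb]
          · rw [hv]
            by_cases hlt : jv < v
            · simp [hlt]
            · have : v = jv := le_antisymm (not_lt.mp hlt) hjv
              simp [this]
        exact ih hlb' b1 hb1inv (Or.inr hb1jv)
      · exact ih hlb' b1 hb1inv (Or.inl ⟨x, hxr, hxe⟩)
    · have hb1jv : b1 = some jv := by
        rw [hb1, pvBestStep, hbjv]
        cases hg : index.get? (PySem.Str.slice low none (some d)) with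
        | none => rfl
        | some i =>
          have hji : jv ≤ i := hlb d (by simp) i hg
          simp [not_lt.mpr hji]
      exact ih hlb' b1 hb1inv (Or.inr hb1jv)

theorem drop_takeWhile_length {α : Type} (p : α → Bool) (l : List α) :
    l.dropWhile p = l.drop (l.takeWhile p).length := by
  induction l with
  | nil => rfl
  | cons a t ih =>
    by_cases h : p a = true
    · simp [h, ih]
    · simp [h]

theorem mem_le_maxD (xs : List Int) (y : Int) (h : y ∈ xs) :
    y ≤ PySem.List.maxD xs (fun x => x) 0 := by
  cases hm : PySem.List.max? xs (fun x => x) with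
  | none =>
    rw [(PySem.List.max?_eq_none_iff xs fun x => x).mp hm] at h
    exact absurd h (List.not_mem_nil)
  | some m => simpa [PySem.List.maxD, hm] using PySem.List.max?_isMax hm y h

-- ===== VERDICT (by name: the statement is the Claim_ definition above) =====
set_option maxHeartbeats 1000000 in
theorem strip_leading_label_with_idx_spec : Claim_equal_strip_leading_label_with_idx := by
  intro s labels _
  unfold Spec_strip_leading_label_with_idx strip_leading_label_with_idx strip_leading_label_with_idx_alt
  by_cases hse : (s == "") = true
  · rw [hse]; rfl
  · rw [Bool.not_eq_true] at hse
    rw [hse]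
    simp only [Bool.false_eq_true, if_false]
    set L := s.toList with hL
    set w : Nat := (L.takeWhile PySem.Chars.isspace).length with hwdef
    have hwle : w ≤ L.length := List.IsPrefix.length_le (List.takeWhile_prefix _)
    have hss : (PySem.Str.lstrip s).toList = L.drop w := by
      rw [PySem.Str.toList_lstrip]
      exact drop_takeWhile_length _ _
    have hlead : PySem.Str.len s - PySem.Str.len (PySem.Str.lstrip s) = (w : Int) := by
      simp only [PySem.Str.len_eq, hss, List.length_drop, ← hL]
      omega
    rw [aloop_eq_findIdx, hlead]
    set lowL := PySem.Chars.lower (L.drop w) with hlowLdef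
    set lowS := PySem.Str.slice (PySem.Str.lower s) (some (w : Int)) none with hlowSdef
    have hlowS : lowS.toList = lowL := by
      rw [hlowSdef, PySem.Str.toList_slice, PySem.Chars.slice_eq_listSlice,
        PySem.List.slice_from_natCast, PySem.Str.toList_lower, hlowLdef]
      simp [PySem.Chars.lower, ← hL]
    have hlowlen : lowL.length = L.length - w := by
      rw [hlowLdef]; simp [PySem.Chars.lower]
    have hQiff : ∀ lab : String,
        (PySem.Str.startswith (PySem.Str.lower (PySem.Str.lstrip s)) (PySem.Str.lower lab)) = true ↔
          PySem.Chars.lower lab.toList <+: lowL := by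
      intro lab
      rw [PySem.Str.startswith_eq, PySem.Chars.startswith_iff, PySem.Str.toList_lower,
        PySem.Str.toList_lower, hss]
    set index := (PySem.List.enumerate labels).foldl pvIndexStep PySem.Dict.empty with hidx
    have hget : ∀ d : Int,
        index.get? (PySem.Str.slice lowS none (some d)) =
          (labels.findIdx? (fun lab => PySem.Str.lower lab == PySem.Str.slice lowS none (some d))).map
            (fun i => (i : Int)) := by
      intro d
      rw [hidx, index_get?, PySem.Dict.get?_empty]
      cases labels.findIdx? (fun lab => PySem.Str.lower lab == PySem.Str.slice lowS none (some d)) with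
      | none => rfl
      | some i => simp
    have hqiff : ∀ (lab : String) (d : Int), 0 ≤ d →
        ((PySem.Str.lower lab == PySem.Str.slice lowS none (some d)) = true ↔
          PySem.Chars.lower lab.toList = lowL.take d.toNat) := by
      intro lab d hd
      rw [beq_iff_eq, ← String.toList_inj, PySem.Str.toList_lower, PySem.Str.toList_slice,
        PySem.Chars.slice_eq_listSlice, PySem.List.slice_to lowS.toList hd, hlowS]
    cases hj : labels.findIdx?
        (fun lab => PySem.Str.startswith (PySem.Str.lower (PySem.Str.lstrip s)) (PySem.Str.lower lab)) with
    | none =>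
      have hnone : ∀ lab ∈ labels, ¬ PySem.Chars.lower lab.toList <+: lowL := by
        intro lab hmem hp
        have := List.findIdx?_eq_none_iff.mp hj lab hmem
        rw [(hQiff lab).mpr hp] at this
        exact absurd this (by simp)
      have hzero : ∀ d ∈ PySem.List.pyRange 0 (min (PySem.Str.len lowS)
          (PySem.List.maxD (index.keys.map PySem.Str.len) (fun x => x) 0) + 1) 1,
          index.get? (PySem.Str.slice lowS none (some d)) = none := by
        intro d hd
        have hd0 : 0 ≤ d := (PySem.List.mem_pyRange_one.mp hd).1
        rw [hget d]
        have : labels.findIdx? (fun lab => PySem.Str.lower lab == PySem.Str.slice lowS none (some d)) = none := by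
          rw [List.findIdx?_eq_none_iff]
          intro lab hmem
          rw [Bool.eq_false_iff]
          intro hq
          exact hnone lab hmem ((hqiff lab d hd0).mp hq ▸ List.take_prefix _ _)
        rw [this]; rfl
      rw [best_none _ _ _ _ hzero]
    | some j =>
      obtain ⟨hjlt, hQj, hQmin⟩ := List.findIdx?_eq_some_iff_getElem.mp hj
      have hpre : PySem.Chars.lower labels[j].toList <+: lowL := (hQiff _).mp hQj
      set dn : Nat := labels[j].toList.length with hdndef
      have hkl : (PySem.Chars.lower labels[j].toList).length = dn := by
        rw [hdndef]; simp [PySem.Chars.lower]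
      have htake : lowL.take dn = PySem.Chars.lower labels[j].toList := by
        have := (List.prefix_iff_eq_take.mp hpre).symm
        rw [hkl] at this
        exact this
      have hdnle : dn ≤ lowL.length := by
        have := List.IsPrefix.length_le hpre
        rw [hkl] at this
        exact this
      have hfind_dn : labels.findIdx?
          (fun lab => PySem.Str.lower lab == PySem.Str.slice lowS none (some (dn : Int))) = some j := by
        rw [List.findIdx?_eq_some_iff_getElem]
        refine ⟨hjlt, ?_, ?_⟩
        · rw [hqiff _ _ (by positivity)]
          simp only [Int.toNat_natCast]
          exact htake.symm
        · intro m hm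
          rw [Bool.not_eq_true, Bool.eq_false_iff]
          intro hq
          have hp : PySem.Chars.lower labels[m].toList <+: lowL := by
            rw [(hqiff _ _ (by positivity)).mp hq]
            exact List.take_prefix _ _
          exact absurd ((hQiff _).mpr hp) (by simpa using hQmin m hm)
      have hget_dn : index.get? (PySem.Str.slice lowS none (some (dn : Int))) = some (j : Int) := by
        rw [hget, hfind_dn]; rfl
      have hlb : ∀ d ∈ PySem.List.pyRange 0 (min (PySem.Str.len lowS)
          (PySem.List.maxD (index.keys.map PySem.Str.len) (fun x => x) 0) + 1) 1,
          ∀ i, index.get? (PySem.Str.slice lowS none (some d)) = some i → (j : Int) ≤ i := by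
        intro d hd i hi
        have hd0 : 0 ≤ d := (PySem.List.mem_pyRange_one.mp hd).1
        rw [hget d] at hi
        cases hfi : labels.findIdx? (fun lab => PySem.Str.lower lab == PySem.Str.slice lowS none (some d)) with
        | none => rw [hfi] at hi; exact absurd hi (by simp)
        | some i0 =>
          rw [hfi] at hi
          have hi2 : ((i0 : Nat) : Int) = i := by simpa using hi
          obtain ⟨hi0lt, hq0, _⟩ := List.findIdx?_eq_some_iff_getElem.mp hfi
          have hp : PySem.Chars.lower labels[i0].toList <+: lowL := by
            rw [(hqiff _ _ hd0).mp hq0]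
            exact List.take_prefix _ _
          have hji0 : j ≤ i0 := by
            by_contra hlt
            exact absurd ((hQiff _).mpr hp) (by simpa using hQmin i0 (by omega))
          rw [← hi2]
          exact_mod_cast hji0
      have hdn_mem : (dn : Int) ∈ PySem.List.pyRange 0 (min (PySem.Str.len lowS)
          (PySem.List.maxD (index.keys.map PySem.Str.len) (fun x => x) 0) + 1) 1 := by
        rw [PySem.List.mem_pyRange_one]
        constructor
        · positivity
        · have h1 : (dn : Int) ≤ PySem.Str.len lowS := by
            rw [PySem.Str.len_eq, hlowS]
            exact_mod_cast hdnle
          have h2 : (dn : Int) ≤ PySem.List.maxD (index.keys.map PySem.Str.len) (fun x => x) 0 := by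
            have hc : index.contains (PySem.Str.slice lowS none (some (dn : Int))) = true := by
              rw [PySem.Dict.contains_eq_isSome_get?, hget_dn]; rfl
            have hk : PySem.Str.slice lowS none (some (dn : Int)) ∈ index.keys :=
              (PySem.Dict.contains_iff_mem_keys _ _).mp hc
            have hlen : PySem.Str.len (PySem.Str.slice lowS none (some (dn : Int))) = (dn : Int) := by
              rw [PySem.Str.len_eq, PySem.Str.toList_slice, PySem.Chars.slice_eq_listSlice,
                PySem.List.slice_to lowS.toList (by positivity), hlowS]
              simp only [Int.toNat_natCast, List.length_take]
              omega
            have : (dn : Int) ∈ index.keys.map PySem.Str.len := by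
              rw [← hlen]
              exact List.mem_map_of_mem hk
            exact mem_le_maxD _ _ this
          omega
      rw [best_min index lowS _ ((j : Nat) : Int) hlb none (Or.inl rfl)
        (Or.inl ⟨(dn : Int), hdn_mem, hget_dn⟩)]
      have hpg : PySem.List.pyGet? labels ((j : Nat) : Int) = some labels[j] := by
        rw [PySem.List.pyGet?_natCast]
        exact List.getElem?_eq_getElem hjlt
      have hgd : labels.getD j "" = labels[j] := List.getD_eq_getElem _ _ hjlt
      simp only [hpg, hgd]
      -- final value equality
      have hw_dn : w + dn ≤ L.length := by
        rw [hlowlen] at hdnle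
        omega
      have hcut : (PySem.Str.slice (PySem.Str.lstrip s) (some ((labels[j].toList.length : Nat) : Int)) none).toList
          = L.drop (w + dn) := by
        rw [PySem.Str.toList_slice, PySem.Chars.slice_eq_listSlice]
        rw [PySem.List.slice_from_natCast, hss, List.drop_drop]
      have hcutB : (PySem.Str.slice s (some ((w : Int) + ((labels[j].toList.length : Nat) : Int))) none).toList
          = L.drop (w + dn) := by
        rw [PySem.Str.toList_slice, PySem.Chars.slice_eq_listSlice]
        have hc : (w : Int) + ((labels[j].toList.length : Nat) : Int) = ((w + dn : Nat) : Int) := by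
          rw [hdndef]; push_cast; ring
        rw [hc, PySem.List.slice_from_natCast]
      rw [pvF]
      have hc2 : (List.dropWhile (fun c => pvStripSet.contains c) (L.drop (w + dn))).length
          ≤ L.length - (w + dn) := by
        simpa using List.length_dropWhile_le (p := fun c => pvStripSet.contains c) (l := L.drop (w + dn))
      refine Prod.ext ?_ ?_
      · simp only [PySem.Str.len_eq, hcut, hcutB]
      · simp only [PySem.Str.len_eq, String.toList_ofList, hcut, hcutB,
          List.length_drop, ← hL]
        omega
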